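-- pv_equiv track=rewrite | github.com/jbpayton/SophiaAMS | DocumentProcessor.py | _split_bullets
-- ===== SOURCE A (Python) =====
-- from typing import Dict, List, Optional
--
-- def _split_bullets(text: str) -> List[str]:
--     """Split a bullet point list into individual bullet points."""
--     lines = text.split('\n')
--     bullet_points = []
--     current_bullet = []
--
--     for line in lines:
--         stripped = line.lstrip()
--         # Check if this line starts a new bullet point
--         if stripped.startswith('- ') or stripped.startswith('* ') or (stripped and stripped[0].isdigit() and stripped[1:3] in ('. ', ') ')):
--             # If we have a previous bullet point, add it
--             if current_bullet:
--                 bullet_points.append('\n'.join(current_bullet))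
--                 current_bullet = []
--
--             # Start a new bullet point
--             current_bullet.append(line)
--         else:
--             # Continue the current bullet point
--             if current_bullet:
--                 current_bullet.append(line)
--             else:
--                 # This is not a bullet point, treat as its own item
--                 bullet_points.append(line)
--
--     # Add the last bullet point
--     if current_bullet:
--         bullet_points.append('\n'.join(current_bullet))
--
--     return bullet_points
-- ===== SOURCE B (Python) =====
-- from typing import List
--
-- def _is_bullet(line: str) -> bool:
--     stripped = line.lstrip()
--     return (stripped.startswith('- ') or stripped.startswith('* ')
--             or (bool(stripped) and stripped[0].isdigit() and stripped[1:3] in ('. ', ') ')))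
--
-- def _split_bullets(text: str) -> List[str]:
--     """Split a bullet point list into individual bullet points."""
--     lines = text.split('\n')
--     out = []
--     i = 0
--     # lines before the first bullet are emitted individually
--     while i < len(lines) and not _is_bullet(lines[i]):
--         out.append(lines[i])
--         i += 1
--     # each group runs from one bullet start up to the next bullet start
--     while i < len(lines):
--         j = i + 1
--         while j < len(lines) and not _is_bullet(lines[j]):
--             j += 1
--         out.append('\n'.join(lines[i:j]))
--         i = j
--     return out
-- ===== Notes on version B (the rewrite author's own statement) =====
-- stated objective: alternative
-- what changed: Replaces A's stateful current_bullet accumulator fold with a stateless two-phase boundary scan: emit pre-bullet lines individually, then slice from each bullet start to the next and join each slice.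
import Mathlib
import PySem

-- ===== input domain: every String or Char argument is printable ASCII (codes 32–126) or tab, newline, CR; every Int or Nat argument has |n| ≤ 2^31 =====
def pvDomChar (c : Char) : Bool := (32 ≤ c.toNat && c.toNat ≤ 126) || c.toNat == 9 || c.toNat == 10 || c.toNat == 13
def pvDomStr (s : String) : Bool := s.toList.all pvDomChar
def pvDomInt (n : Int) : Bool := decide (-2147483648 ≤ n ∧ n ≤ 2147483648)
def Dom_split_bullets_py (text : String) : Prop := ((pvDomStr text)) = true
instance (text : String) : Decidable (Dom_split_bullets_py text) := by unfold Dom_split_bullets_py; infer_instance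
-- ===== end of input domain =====

-- B replaces A's stateful current_bullet accumulator with a stateless two-phase
-- boundary scan (pre-bullet lines individually, then bullet-to-bullet slices); alternative decomposition, same cost.

-- ===== PORT A =====
-- A's per-line step on the state (bullet_points, current_bullet); the bullet test is inlined as in A.
-- split? never returns none for the literal separator "\\n"; .getD [] only discharges the Option.
def pvStepA (st : List String × List String) (line : String) : List String × List String :=
  let stripped := PySem.Str.lstrip line
  if PySem.Str.startswith stripped "- " || PySem.Str.startswith stripped "* "
      || (!(stripped == "") && ((PySem.Str.pyGet? stripped 0).elim false PySem.Chars.isdigit)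
          && (PySem.Str.slice stripped (some 1) (some 3) == ". "
              || PySem.Str.slice stripped (some 1) (some 3) == ") ")) then
    if st.2 ≠ [] then (st.1 ++ [PySem.Str.join "\n" st.2], [line])
    else (st.1, [line])
  else
    if st.2 ≠ [] then (st.1, st.2 ++ [line])
    else (st.1 ++ [line], st.2)

def split_bullets_py (text : String) : List String :=
  let lines := (PySem.Str.split? text "\n").getD []
  let st := lines.foldl pvStepA ([], [])
  if st.2 ≠ [] then st.1 ++ [PySem.Str.join "\n" st.2] else st.1

-- ===== PORT B =====
-- Source B's is_bullet helper
def pvIsBullet (line : String) : Bool :=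
  let stripped := PySem.Str.lstrip line
  PySem.Str.startswith stripped "- " || PySem.Str.startswith stripped "* "
    || (!(stripped == "") && ((PySem.Str.pyGet? stripped 0).elim false PySem.Chars.isdigit)
        && (PySem.Str.slice stripped (some 1) (some 3) == ". "
            || PySem.Str.slice stripped (some 1) (some 3) == ") "))

-- Source B's second phase: from each bullet start, scan to the next bullet start and join the slice
def pvGroups : List String → List String
  | [] => []
  | l :: ls =>
    PySem.Str.join "\n" (l :: ls.takeWhile (fun x => !pvIsBullet x))
      :: pvGroups (ls.dropWhile (fun x => !pvIsBullet x))
termination_by ls => ls.length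
decreasing_by simpa using Nat.lt_succ_of_le (List.length_dropWhile_le _ _)

def split_bullets_py_alt (text : String) : List String :=
  let lines := (PySem.Str.split? text "\n").getD []
  lines.takeWhile (fun x => !pvIsBullet x) ++ pvGroups (lines.dropWhile (fun x => !pvIsBullet x))

-- ===== PRECONDITION & SPEC =====
def Spec_split_bullets_py (text : String) (out : List String) : Prop := out = split_bullets_py_alt text
instance (text : String) (out : List String) : Decidable (Spec_split_bullets_py text out) := by unfold Spec_split_bullets_py; infer_instance

-- ===== CLAIM (what is proved, stated in full; the proofs are below) =====
def Claim_equal_split_bullets_py : Prop := ∀ (text : String), Dom_split_bullets_py text → Spec_split_bullets_py text (split_bullets_py text)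

-- ===== LEMMAS AND PROOFS =====

-- A's final "flush" of the accumulator
def pvFinishA (st : List String × List String) : List String :=
  if st.2 ≠ [] then st.1 ++ [PySem.Str.join "\n" st.2] else st.1

theorem pvStepA_eq (st : List String × List String) (line : String) :
    pvStepA st line =
      if pvIsBullet line then
        if st.2 ≠ [] then (st.1 ++ [PySem.Str.join "\n" st.2], [line]) else (st.1, [line])
      else
        if st.2 ≠ [] then (st.1, st.2 ++ [line]) else (st.1 ++ [line], st.2) := by
  rfl

-- invariant while the accumulator is nonempty
theorem pvFoldA_nonempty (ls : List String) : ∀ (bps cur : List String), cur ≠ [] →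
    pvFinishA (ls.foldl pvStepA (bps, cur)) =
      bps ++ PySem.Str.join "\n" (cur ++ ls.takeWhile (fun x => !pvIsBullet x))
        :: pvGroups (ls.dropWhile (fun x => !pvIsBullet x)) := by
  induction ls with
  | nil => intro bps cur h; simp [pvFinishA, h, pvGroups]
  | cons l ls ih =>
    intro bps cur h
    by_cases hb : pvIsBullet l
    · simp only [List.foldl_cons, pvStepA_eq, hb, if_pos h, if_true,
        List.takeWhile_cons, List.dropWhile_cons, Bool.not_eq_true']
      rw [ih _ [l] (by simp)]
      simp [pvGroups]
    · simp only [List.foldl_cons, pvStepA_eq, hb, if_pos h, if_false, Bool.false_eq_true,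
        List.takeWhile_cons, List.dropWhile_cons, Bool.not_eq_true', if_true]
      rw [ih _ (cur ++ [l]) (by simp)]
      simp

-- invariant while the accumulator is still empty (before the first bullet)
theorem pvFoldA_empty (ls : List String) : ∀ (bps : List String),
    pvFinishA (ls.foldl pvStepA (bps, [])) =
      bps ++ ls.takeWhile (fun x => !pvIsBullet x)
        ++ pvGroups (ls.dropWhile (fun x => !pvIsBullet x)) := by
  induction ls with
  | nil => intro bps; simp [pvFinishA, pvGroups]
  | cons l ls ih =>
    intro bps
    by_cases hb : pvIsBullet l
    · simp only [List.foldl_cons, pvStepA_eq, hb, if_true, ne_eq, not_true_eq_false,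
        if_false, List.takeWhile_cons, List.dropWhile_cons, Bool.not_eq_true']
      rw [pvFoldA_nonempty _ _ [l] (by simp)]
      simp [pvGroups]
    · simp only [List.foldl_cons, pvStepA_eq, hb, if_false, Bool.false_eq_true,
        List.takeWhile_cons, List.dropWhile_cons, Bool.not_eq_true', if_true,
        ne_eq, not_true_eq_false, List.nil_append]
      rw [ih (bps ++ [l])]
      simp

-- ===== VERDICT (by name: the statement is the Claim_ definition above) =====
theorem split_bullets_py_spec : Claim_equal_split_bullets_py := by
  intro text _
  show split_bullets_py text = split_bullets_py_alt text
  simp only [split_bullets_py, split_bullets_py_alt]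
  have := pvFoldA_empty ((PySem.Str.split? text "\n").getD []) []
  simpa [pvFinishA] using this
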